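-- pv_equiv track=rewrite | github.com/jiany-love/math_solving_ai | math_solver.py | calculate_permutation
-- ===== SOURCE A (Python) =====
-- def calculate_permutation(n: int, r: int) -> int:
--     """순열 계산 nPr"""
--     if r > n or r < 0:
--         return 0
--     if r == 0:
--         return 1
--
--     result = 1
--     for i in range(n, n - r, -1):
--         result *= i
--
--     return result
-- ===== SOURCE B (Python) =====
-- def _range_prod(lo: int, hi: int) -> int:
--     """Product of all integers in [lo, hi], by balanced divide and conquer."""
--     if lo > hi:
--         return 1
--     if lo == hi:
--         return lo
--     mid = lo + (hi - lo) // 2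
--     return _range_prod(lo, mid) * _range_prod(mid + 1, hi)
--
-- def calculate_permutation(n: int, r: int) -> int:
--     """순열 계산 nPr as a balanced product of the range [n-r+1, n]."""
--     if r > n or r < 0:
--         return 0
--     return _range_prod(n - r + 1, n)
-- ===== Notes on version B (the rewrite author's own statement) =====
-- stated objective: alternative
-- what changed: Replaces the linear descending multiplication loop with a balanced divide-and-conquer product of the range [n-r+1, n], which keeps big-integer operands balanced in size.
import Mathlib
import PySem

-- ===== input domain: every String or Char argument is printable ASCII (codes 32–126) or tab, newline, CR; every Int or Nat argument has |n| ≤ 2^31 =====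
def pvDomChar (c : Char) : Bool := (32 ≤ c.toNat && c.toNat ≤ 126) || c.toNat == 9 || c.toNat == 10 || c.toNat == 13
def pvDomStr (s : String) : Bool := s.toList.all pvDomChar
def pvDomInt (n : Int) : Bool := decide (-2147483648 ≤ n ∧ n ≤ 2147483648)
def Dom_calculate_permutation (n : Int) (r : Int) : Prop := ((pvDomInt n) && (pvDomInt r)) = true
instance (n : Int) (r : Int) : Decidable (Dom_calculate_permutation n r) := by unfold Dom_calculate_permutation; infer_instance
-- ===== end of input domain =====

-- B replaces A's descending multiplication loop with a balanced divide-and-conquer product of [n-r+1, n].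

-- ===== PORT A =====
def calculate_permutation (n : Int) (r : Int) : Int :=
  if r > n ∨ r < 0 then 0
  else if r = 0 then 1
  else (PySem.List.pyRange n (n - r) (-1)).foldl (fun result i => result * i) 1

-- ===== PORT B =====
-- product of all integers in [lo, hi], by balanced divide and conquer (helper _range_prod of Source B)
def pvRangeProd (lo hi : Int) : Int :=
  if lo > hi then 1
  else if lo = hi then lo
  else
    let mid := lo + PySem.Int.floordiv (hi - lo) 2
    pvRangeProd lo mid * pvRangeProd (mid + 1) hi
termination_by (hi - lo).toNat
decreasing_by
  all_goals
    rw [PySem.Int.floordiv_eq_ediv_of_pos (by omega)]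
    omega

def calculate_permutation_alt (n : Int) (r : Int) : Int :=
  if r > n ∨ r < 0 then 0
  else pvRangeProd (n - r + 1) n

-- ===== PRECONDITION & SPEC =====
def Spec_calculate_permutation (n : Int) (r : Int) (out : Int) : Prop := out = calculate_permutation_alt n r
instance (n : Int) (r : Int) (out : Int) : Decidable (Spec_calculate_permutation n r out) := by unfold Spec_calculate_permutation; infer_instance

-- ===== CLAIM (what is proved, stated in full; the proofs are below) =====
def Claim_equal_calculate_permutation : Prop := ∀ (n : Int) (r : Int), Dom_calculate_permutation n r → Spec_calculate_permutation n r (calculate_permutation n r)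

-- ===== LEMMAS AND PROOFS =====

-- the balanced product equals the product of the ascending range [lo, hi]
theorem pvRangeProd_eq (lo hi : Int) :
    pvRangeProd lo hi = (PySem.List.pyRange lo (hi + 1) 1).prod := by
  fun_induction pvRangeProd lo hi with
  | case1 lo hi h =>
    rw [PySem.List.pyRange_one_eq_nil (by omega)]
    simp
  | case2 lo h =>
    rw [PySem.List.pyRange_one_singleton]
    simp
  | case3 lo hi h1 h2 mid ih1 ih2 =>
    have hmid : lo ≤ mid ∧ mid < hi := by
      constructor <;>
        · simp only [mid, PySem.Int.floordiv_eq_ediv_of_pos (show (0:Int) < 2 by omega)]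
          omega
    rw [PySem.List.pyRange_one_append lo (mid + 1) (hi + 1) (by omega) (by omega)]
    rw [List.prod_append, ih1, ih2]

-- A's descending fold is the product of the ascending range
theorem pv_loop_eq (n r : Int) :
    (PySem.List.pyRange n (n - r) (-1)).foldl (fun result i => result * i) 1
      = (PySem.List.pyRange (n - r + 1) (n + 1) 1).prod := by
  rw [← List.prod_eq_foldl, PySem.List.pyRange_neg_one_eq_reverse, List.prod_reverse]

-- ===== VERDICT (by name: the statement is the Claim_ definition above) =====
theorem calculate_permutation_spec : Claim_equal_calculate_permutation := by
  intro n r _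
  unfold Spec_calculate_permutation calculate_permutation calculate_permutation_alt
  by_cases hg : r > n ∨ r < 0
  · simp [hg]
  · rw [not_or, not_lt, not_lt] at hg
    obtain ⟨hrn, h0⟩ := hg
    have hng : ¬ (r > n ∨ r < 0) := by omega
    simp only [if_neg hng]
    rw [pvRangeProd_eq]
    by_cases hr0 : r = 0
    · subst hr0
      rw [if_pos rfl, PySem.List.pyRange_one_eq_nil (by omega)]
      simp
    · rw [if_neg hr0, pv_loop_eq n r]
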